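-- pv_equiv track=rewrite | github.com/batrachosaurus/EAGLE | eaglib/_utils/strings.py | get_un_fix
-- ===== SOURCE A (Python) =====
-- def get_un_fix(un_num, fix_len):
--     un_codes = ["_", '0', '1', '2', '3', '4', '5', '6', '7', '8', '9', 'A', 'B', 'C', 'D', 'E']
--     # 'N' - undefined (num duplicates is bigger than len(un_codes))
--     if fix_len == 1:
--         try:
--             return un_codes[un_num]
--         except IndexError:
--             return 'N'
--     elif fix_len == 0:
--         return ""
--     elif un_num < len(un_codes):
--         return un_codes[0] + get_un_fix(un_num, fix_len - 1)
--     else: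
--         filled_rank = len(un_codes)**(fix_len-1)
--         return un_codes[un_num//filled_rank] + get_un_fix(un_num % filled_rank, fix_len - 1)
-- ===== SOURCE B (Python) =====
-- def get_un_fix(un_num, fix_len):
--     un_codes = ["_", '0', '1', '2', '3', '4', '5', '6', '7', '8', '9', 'A', 'B', 'C', 'D', 'E']
--     n = len(un_codes)
--     if fix_len == 0:
--         return ""
--     out = []
--     num = un_num
--     L = fix_len
--     while L > 1:
--         if num < n:
--             out.append(un_codes[0])
--         else:
--             filled_rank = n ** (L - 1)
--             out.append(un_codes[num // filled_rank])
--             num %= filled_rank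
--         L -= 1
--     try:
--         out.append(un_codes[num])
--     except IndexError:
--         out.append('N')
--     return "".join(out)
-- ===== Notes on version B (the rewrite author's own statement) =====
-- stated objective: alternative
-- what changed: Replaced A's recursion on fix_len by an explicit left-to-right while loop that accumulates the digit characters in a list and joins them once; only the final digit lookup is guarded by try/except.
import Mathlib
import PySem

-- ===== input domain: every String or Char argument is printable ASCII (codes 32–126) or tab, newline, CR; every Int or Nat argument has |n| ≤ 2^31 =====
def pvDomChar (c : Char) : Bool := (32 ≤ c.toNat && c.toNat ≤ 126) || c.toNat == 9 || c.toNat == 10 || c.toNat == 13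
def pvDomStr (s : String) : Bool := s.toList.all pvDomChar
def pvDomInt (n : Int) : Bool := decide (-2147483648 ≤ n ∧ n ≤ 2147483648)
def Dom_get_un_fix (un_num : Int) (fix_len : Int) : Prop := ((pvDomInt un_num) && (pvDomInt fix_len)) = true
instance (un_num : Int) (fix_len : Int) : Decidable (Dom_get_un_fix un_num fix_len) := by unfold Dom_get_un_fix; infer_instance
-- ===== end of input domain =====

-- B rewrites A's recursion as an explicit left-to-right loop over the digit positions (alternative decomposition, same cost class).

-- ===== PORT A =====
def unCodes : List String := ["_", "0", "1", "2", "3", "4", "5", "6", "7", "8", "9", "A", "B", "C", "D", "E"]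

-- recursion of A on fix_len (as a Nat); in the fix_len ≥ 2 branch Python's un_codes[un_num//filled_rank]
-- raises an uncaught IndexError when the index is out of range — the "N" default there is a sentinel,
-- those inputs are excluded by Pre_get_un_fix.
def getUnFixAux (un_num : Int) : Nat → String
  | 1 => (PySem.List.pyGet? unCodes un_num).getD "N"   -- try/except IndexError → 'N'
  | 0 => ""
  | (l+2) =>
    if un_num < 16 then
      "_" ++ getUnFixAux un_num (l+1)
    else
      let filled_rank : Int := (16 : Int) ^ (l+1)
      (PySem.List.pyGet? unCodes (PySem.Int.floordiv un_num filled_rank)).getD "N"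
        ++ getUnFixAux (PySem.Int.mod un_num filled_rank) (l+1)

-- for fix_len < 0 Python A never terminates (RecursionError); excluded by Pre_get_un_fix
def get_un_fix (un_num : Int) (fix_len : Int) : String :=
  if fix_len < 0 then "" else getUnFixAux un_num fix_len.toNat

-- ===== PORT B =====
-- B's while loop `while L > 1`, recursion on the decreasing counter L; state = (out, num)
def altLoop : List String → Int → Nat → List String × Int
  | out, num, (l+2) =>
    if num < 16 then
      altLoop (out ++ ["_"]) num (l+1)
    else
      let filled_rank : Int := (16 : Int) ^ (l+1)
      altLoop (out ++ [(PySem.List.pyGet? unCodes (PySem.Int.floordiv num filled_rank)).getD "N"])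
              (PySem.Int.mod num filled_rank) (l+1)
  | out, num, 1 => (out, num)
  | out, num, 0 => (out, num)

def get_un_fix_alt (un_num : Int) (fix_len : Int) : String :=
  if fix_len = 0 then ""
  else
    let st := altLoop [] un_num fix_len.toNat
    String.join (st.1 ++ [(PySem.List.pyGet? unCodes st.2).getD "N"])

-- ===== PRECONDITION & SPEC =====
-- Pre_ excludes exactly the inputs where Python A raises: fix_len < 0 (infinite recursion /
-- RecursionError) and fix_len ≥ 2 with un_num ≥ 16^fix_len (uncaught IndexError on the leading digit).
def Pre_get_un_fix (un_num : Int) (fix_len : Int) : Prop :=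
  0 ≤ fix_len ∧ (2 ≤ fix_len → un_num < (16 : Int) ^ fix_len.toNat)
instance (un_num : Int) (fix_len : Int) : Decidable (Pre_get_un_fix un_num fix_len) := by
  unfold Pre_get_un_fix; infer_instance

def pvWitness_get_un_fix : Int × Int := (300, 3)

def Spec_get_un_fix (un_num : Int) (fix_len : Int) (out : String) : Prop := out = get_un_fix_alt un_num fix_len
instance (un_num : Int) (fix_len : Int) (out : String) : Decidable (Spec_get_un_fix un_num fix_len out) := by unfold Spec_get_un_fix; infer_instance

-- ===== CLAIM (what is proved, stated in full; the proofs are below) =====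
def Claim_equal_get_un_fix : Prop := ∀ (un_num : Int) (fix_len : Int), Dom_get_un_fix un_num fix_len → Pre_get_un_fix un_num fix_len → Spec_get_un_fix un_num fix_len (get_un_fix un_num fix_len)

-- ===== LEMMAS AND PROOFS =====
lemma join_snoc (xs : List String) (s : String) :
    String.join (xs ++ [s]) = String.join xs ++ s := by
  induction xs with
  | nil => simp [String.join]
  | cons x xs ih => simp [String.join, ih, String.append_assoc]

lemma loop_eq (l : Nat) : ∀ (out : List String) (num : Int),
    String.join ((altLoop out num (l+1)).1 ++ [(PySem.List.pyGet? unCodes (altLoop out num (l+1)).2).getD "N"])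
      = String.join out ++ getUnFixAux num (l+1) := by
  induction l with
  | zero =>
    intro out num
    simp [altLoop, getUnFixAux, join_snoc]
  | succ l ih =>
    intro out num
    by_cases h : num < 16
    · simp only [altLoop, getUnFixAux, if_pos h]
      rw [ih]
      simp [join_snoc, String.append_assoc]
    · simp only [altLoop, getUnFixAux, if_neg h]
      rw [ih]
      simp [join_snoc, String.append_assoc]

-- ===== VERDICT (by name: the statement is the Claim_ definition above) =====
theorem get_un_fix_spec : Claim_equal_get_un_fix := by
  intro un_num fix_len _ hpre
  unfold Spec_get_un_fix get_un_fix get_un_fix_alt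
  obtain ⟨h0, _⟩ := hpre
  rcases eq_or_lt_of_le h0 with h | h
  · simp [← h, getUnFixAux]
  · have hneg : ¬ fix_len < 0 := by omega
    have hne : ¬ fix_len = 0 := by omega
    obtain ⟨l, hl⟩ : ∃ l : Nat, fix_len.toNat = l + 1 := ⟨fix_len.toNat - 1, by omega⟩
    simp only [if_neg hneg, if_neg hne, hl]
    rw [loop_eq]
    simp [String.join]
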